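-- pv_equiv track=rewrite | github.com/ChuaHanChong/DeepSDF | deep_sdf/data.py | build_category_index_map
-- ===== SOURCE A (Python) =====
-- def build_category_index_map(split):
--     category_to_indices = {}
--     index_to_category = []
--     idx = 0
--     for dataset in split:
--         for class_name in split[dataset]:
--             if class_name not in category_to_indices:
--                 category_to_indices[class_name] = []
--             for instance_name in split[dataset][class_name]:
--                 category_to_indices[class_name].append(idx)
--                 index_to_category.append(class_name)
--                 idx += 1
--     return category_to_indices, index_to_category
-- ===== SOURCE B (Python) =====
-- def build_category_index_map(split):
--     # Run-length view: one (class_name, count) run per (dataset, class) occurrence.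
--     runs = [(class_name, len(instances))
--             for dataset in split.values()
--             for class_name, instances in dataset.items()]
--     # Indices of each run are computed arithmetically as a range from a prefix-sum
--     # offset -- no per-instance counting loop for the dict.
--     category_to_indices = {}
--     offset = 0
--     for class_name, n in runs:
--         block = list(range(offset, offset + n))
--         if class_name in category_to_indices:
--             category_to_indices[class_name].extend(block)
--         else:
--             category_to_indices[class_name] = block
--         offset += n
--     index_to_category = []
--     for class_name, n in runs:
--         index_to_category += [class_name] * n
--     return category_to_indices, index_to_category
-- ===== Notes on version B (the rewrite author's own statement) =====
-- stated objective: alternative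
-- what changed: A walks every instance with a running idx counter, appending one index and one class name at a time; B reduces the split to (class, count) runs and assigns each run its whole index block arithmetically as range(offset, offset+count) from a prefix-sum offset, building index_to_category by list repetition instead of per-instance appends.
import Mathlib
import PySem

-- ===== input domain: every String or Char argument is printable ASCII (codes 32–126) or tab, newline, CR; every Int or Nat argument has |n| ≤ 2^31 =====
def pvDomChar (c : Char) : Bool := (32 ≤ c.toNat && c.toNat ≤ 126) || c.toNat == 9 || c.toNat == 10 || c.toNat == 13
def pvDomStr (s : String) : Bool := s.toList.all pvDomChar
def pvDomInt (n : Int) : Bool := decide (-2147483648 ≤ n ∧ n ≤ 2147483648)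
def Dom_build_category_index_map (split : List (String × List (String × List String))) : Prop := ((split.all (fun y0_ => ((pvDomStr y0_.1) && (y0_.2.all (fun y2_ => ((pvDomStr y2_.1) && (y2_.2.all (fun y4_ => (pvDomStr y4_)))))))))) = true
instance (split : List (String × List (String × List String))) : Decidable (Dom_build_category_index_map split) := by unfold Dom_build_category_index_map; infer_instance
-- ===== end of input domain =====

-- B replaces A's per-instance counter loop by a run-length algorithm: it reduces the split to
-- (class, count) runs and assigns each run its index block arithmetically as a range from a
-- prefix-sum offset (objective: alternative algorithm, same asymptotic cost).

-- ===== PORT A =====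
-- literal transliteration of A's single nested loop carrying (dict, index_to_category, idx)
def build_category_index_map (split : List (String × List (String × List String))) : (List (String × List Int)) × List String :=
  let st :=
    split.foldl (fun (st : PySem.Dict String (List Int) × List String × Int) dataset =>
      dataset.2.foldl (fun st cl =>
        let d := if st.1.contains cl.1 then st.1 else st.1.insert cl.1 []
        cl.2.foldl (fun st _ =>
          (st.1.modify cl.1 [] (fun l => l ++ [st.2.2]), st.2.1 ++ [cl.1], st.2.2 + 1))
          (d, st.2))
        st)
      (PySem.Dict.empty, ([], 0))
  (st.1.items, st.2.1)

-- ===== PORT B =====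
-- transliteration of Source B: (class, count) runs, then range blocks from prefix-sum offsets
def build_category_index_map_alt (split : List (String × List (String × List String))) : (List (String × List Int)) × List String :=
  let runs :=
    split.flatMap (fun dataset => dataset.2.map (fun cl => (cl.1, (cl.2.length : Int))))
  let st :=
    runs.foldl (fun (p : PySem.Dict String (List Int) × Int) r =>
      let block := PySem.List.pyRange p.2 (p.2 + r.2)
      ((if p.1.contains r.1 then p.1.modify r.1 [] (fun l => l ++ block)
        else p.1.insert r.1 block), p.2 + r.2))
      (PySem.Dict.empty, 0)
  let index_to_category :=
    runs.foldl (fun l r => l ++ List.replicate r.2.toNat r.1) []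
  (st.1.items, index_to_category)

-- ===== PRECONDITION & SPEC =====
def Spec_build_category_index_map (split : List (String × List (String × List String))) (out : (List (String × List Int)) × List String) : Prop := out = build_category_index_map_alt split
instance (split : List (String × List (String × List String))) (out : (List (String × List Int)) × List String) : Decidable (Spec_build_category_index_map split out) := by unfold Spec_build_category_index_map; infer_instance

-- ===== CLAIM (what is proved, stated in full; the proofs are below) =====
def Claim_equal_build_category_index_map : Prop := ∀ (split : List (String × List (String × List String))), Dom_build_category_index_map split → Spec_build_category_index_map split (build_category_index_map split)

-- ===== LEMMAS AND PROOFS =====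

-- A's three loop bodies, as named functions (definitionally the lambdas of A's port)
def pvInstStep (c : String) (st : PySem.Dict String (List Int) × List String × Int) (_ : String) :
    PySem.Dict String (List Int) × List String × Int :=
  (st.1.modify c [] (fun l => l ++ [st.2.2]), st.2.1 ++ [c], st.2.2 + 1)

def pvClassStep (st : PySem.Dict String (List Int) × List String × Int) (cl : String × List String) :
    PySem.Dict String (List Int) × List String × Int :=
  let d := if st.1.contains cl.1 then st.1 else st.1.insert cl.1 []
  cl.2.foldl (pvInstStep cl.1) (d, st.2)

def pvDatasetStep (st : PySem.Dict String (List Int) × List String × Int)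
    (dataset : String × List (String × List String)) :
    PySem.Dict String (List Int) × List String × Int :=
  dataset.2.foldl pvClassStep st

-- B's run step, as a named function (definitionally the lambda of B's port)
def pvRunStep (p : PySem.Dict String (List Int) × Int) (r : String × Int) :
    PySem.Dict String (List Int) × Int :=
  let block := PySem.List.pyRange p.2 (p.2 + r.2)
  ((if p.1.contains r.1 then p.1.modify r.1 [] (fun l => l ++ block)
    else p.1.insert r.1 block), p.2 + r.2)

def pvRuns (split : List (String × List (String × List String))) : List (String × Int) :=
  split.flatMap (fun dataset => dataset.2.map (fun cl => (cl.1, (cl.2.length : Int))))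

-- re-inserting a key's own current value is the identity (keys unique)
lemma pv_insert_getD_self (d : PySem.Dict String (List Int)) (k : String)
    (hnd : d.keys.Nodup) (hc : d.contains k = true) (dflt : List Int) :
    d.insert k (d.getD k dflt) = d := by
  apply PySem.Dict.ext
  rw [PySem.Dict.items_insert_of_contains _ _ hc]
  conv_rhs => rw [← List.map_id d.items]
  apply List.map_congr_left
  intro p hp
  by_cases hbe : (p.1 == k) = true
  · have h1 : p.1 = k := eq_of_beq hbe
    have h2 : d.getD k dflt = p.2 := by
      have : (k, p.2) ∈ d.items := by rw [← h1]; exact hp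
      exact PySem.Dict.getD_of_mem_items d this hnd dflt
    simp only [hbe, if_pos, h2]
    exact Prod.ext h1.symm rfl
  · simp [hbe]

-- filling one run: folding A's per-index appends over the enumerated repeats of one class
-- name appends exactly the arithmetic range of the run
lemma pv_fill_run (n : Nat) (c : String) (d : PySem.Dict String (List Int)) (idx : Int)
    (hnd : d.keys.Nodup) (hc : d.contains c = true) :
    (PySem.List.enumerate (List.replicate n c) idx).foldl
        (fun d (p : Int × String) => d.modify p.2 [] (fun l => l ++ [p.1])) d =
      d.insert c (d.getD c [] ++ PySem.List.pyRange idx (idx + n)) := by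
  induction n generalizing d idx with
  | zero =>
      simp only [List.replicate, PySem.List.enumerate_nil, List.foldl_nil, Nat.cast_zero, add_zero]
      rw [show PySem.List.pyRange idx idx = [] by simp [PySem.List.pyRange], List.append_nil]
      exact (pv_insert_getD_self d c hnd hc []).symm
  | succ m ih =>
      rw [List.replicate_succ, PySem.List.enumerate_cons, List.foldl_cons]
      have hstep : d.modify c [] (fun l => l ++ [idx]) = d.insert c (d.getD c [] ++ [idx]) := rfl
      rw [hstep, ih (d.insert c (d.getD c [] ++ [idx])) (idx + 1)
            (PySem.Dict.nodup_keys_insert d c _ hnd)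
            (by simp)]
      rw [PySem.Dict.getD_insert_self, PySem.Dict.insert_insert_self]
      have hr : PySem.List.pyRange idx (idx + ((m + 1 : Nat) : Int)) =
          idx :: PySem.List.pyRange (idx + 1) (idx + 1 + (m : Int)) := by
        rw [PySem.List.pyRange_one_cons (by push_cast; omega)]
        have : idx + ((m + 1 : Nat) : Int) = idx + 1 + (m : Int) := by push_cast; ring
        rw [this]
      rw [hr]
      simp

-- nodup keys survive B's run step
lemma pv_nodup_runStep (p : PySem.Dict String (List Int) × Int) (r : String × Int)
    (hnd : p.1.keys.Nodup) : (pvRunStep p r).1.keys.Nodup := by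
  unfold pvRunStep
  dsimp only
  split
  · exact PySem.Dict.nodup_keys_insert _ _ _ hnd
  · exact PySem.Dict.nodup_keys_insert _ _ _ hnd

-- one of A's class iterations equals one of B's run steps
lemma pv_class_run (d : PySem.Dict String (List Int)) (l : List String) (idx : Int)
    (cl : String × List String) (hnd : d.keys.Nodup) :
    pvClassStep (d, (l, idx)) cl =
      ((pvRunStep (d, idx) (cl.1, (cl.2.length : Int))).1,
        (l ++ List.replicate cl.2.length cl.1,
          (pvRunStep (d, idx) (cl.1, (cl.2.length : Int))).2)) := by
  have hinst : ∀ (insts : List String) (d' : PySem.Dict String (List Int)) (l' : List String) (i : Int),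
      insts.foldl (pvInstStep cl.1) (d', (l', i)) =
        ((PySem.List.enumerate (List.replicate insts.length cl.1) i).foldl
            (fun d (p : Int × String) => d.modify p.2 [] (fun l => l ++ [p.1])) d',
          (l' ++ List.replicate insts.length cl.1, i + insts.length)) := by
    intro insts
    induction insts with
    | nil => intro d' l' i; simp [PySem.List.enumerate_nil]
    | cons x xs ih =>
        intro d' l' i
        rw [List.foldl_cons]
        show xs.foldl (pvInstStep cl.1) (d'.modify cl.1 [] (fun l => l ++ [i]), (l' ++ [cl.1], i + 1)) = _
        rw [ih]
        simp only [List.length_cons, List.replicate_succ, PySem.List.enumerate_cons, List.foldl_cons]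
        refine Prod.ext rfl (Prod.ext ?_ ?_)
        · simp
        · simp; ring
  unfold pvClassStep
  dsimp only
  rw [hinst]
  unfold pvRunStep
  dsimp only
  by_cases hc : d.contains cl.1 = true
  · rw [if_pos hc, if_pos hc]
    rw [pv_fill_run cl.2.length cl.1 d idx hnd hc]
    rfl
  · rw [if_neg hc, if_neg hc]
    rw [pv_fill_run cl.2.length cl.1 (d.insert cl.1 []) idx
          (PySem.Dict.nodup_keys_insert d cl.1 _ hnd)
          (by simp)]
    rw [PySem.Dict.getD_insert_self, PySem.Dict.insert_insert_self]
    rfl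

-- A's class loop over a list of classes = B's run fold over the corresponding runs
lemma pv_classes_run (classes : List (String × List String))
    (d : PySem.Dict String (List Int)) (l : List String) (idx : Int) (hnd : d.keys.Nodup) :
    classes.foldl pvClassStep (d, (l, idx)) =
      (((classes.map (fun cl => (cl.1, (cl.2.length : Int)))).foldl pvRunStep (d, idx)).1,
        (l ++ (classes.map (fun cl => (cl.1, (cl.2.length : Int)))).flatMap
            (fun r => List.replicate r.2.toNat r.1),
          ((classes.map (fun cl => (cl.1, (cl.2.length : Int)))).foldl pvRunStep (d, idx)).2)) := by
  induction classes generalizing d l idx with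
  | nil => simp
  | cons cl cls ih =>
      rw [List.foldl_cons, pv_class_run d l idx cl hnd]
      rw [ih _ _ _ (pv_nodup_runStep (d, idx) _ hnd)]
      simp [List.map_cons, List.foldl_cons]

-- A's dataset loop = B's run fold over the flattened runs of the split
lemma pv_split_run (split : List (String × List (String × List String)))
    (d : PySem.Dict String (List Int)) (l : List String) (idx : Int) (hnd : d.keys.Nodup) :
    split.foldl pvDatasetStep (d, (l, idx)) =
      (((pvRuns split).foldl pvRunStep (d, idx)).1,
        (l ++ (pvRuns split).flatMap (fun r => List.replicate r.2.toNat r.1),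
          ((pvRuns split).foldl pvRunStep (d, idx)).2)) := by
  induction split generalizing d l idx with
  | nil => simp [pvRuns]
  | cons ds rest ih =>
      rw [List.foldl_cons]
      show rest.foldl pvDatasetStep (ds.2.foldl pvClassStep (d, (l, idx))) = _
      rw [pv_classes_run ds.2 d l idx hnd]
      have hnd' : (((ds.2.map (fun cl => (cl.1, (cl.2.length : Int)))).foldl pvRunStep (d, idx)).1).keys.Nodup := by
        have : ∀ (rs : List (String × Int)) (p : PySem.Dict String (List Int) × Int),
            p.1.keys.Nodup → ((rs.foldl pvRunStep p).1).keys.Nodup := by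
          intro rs
          induction rs with
          | nil => intro p h; exact h
          | cons r rs ih2 => intro p h; exact ih2 _ (pv_nodup_runStep p r h)
        exact this _ (d, idx) hnd
      rw [ih _ _ _ hnd']
      have hruns : pvRuns (ds :: rest) =
          ds.2.map (fun cl => (cl.1, (cl.2.length : Int))) ++ pvRuns rest := by
        simp [pvRuns]
      rw [hruns, List.foldl_append, List.flatMap_append]
      exact Prod.ext rfl (Prod.ext (by simp) rfl)

-- ===== VERDICT (by name: the statement is the Claim_ definition above) =====
theorem build_category_index_map_spec : Claim_equal_build_category_index_map := by
  intro split _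
  unfold Spec_build_category_index_map build_category_index_map build_category_index_map_alt
  show ((split.foldl pvDatasetStep
      ((PySem.Dict.empty : PySem.Dict String (List Int)), (([] : List String), (0 : Int)))).1.items,
    (split.foldl pvDatasetStep
      ((PySem.Dict.empty : PySem.Dict String (List Int)), (([] : List String), (0 : Int)))).2.1) = _
  rw [pv_split_run split PySem.Dict.empty [] 0 (by simp [PySem.Dict.keys, PySem.Dict.empty])]
  show ((((pvRuns split).foldl pvRunStep (PySem.Dict.empty, 0)).1.items,
      [] ++ (pvRuns split).flatMap (fun r => List.replicate r.2.toNat r.1))) =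
    ((((pvRuns split).foldl pvRunStep (PySem.Dict.empty, 0)).1.items,
      (pvRuns split).foldl (fun l r => l ++ List.replicate r.2.toNat r.1) []))
  rw [PySem.List.foldl_append_eq_flatMap (fun r : String × Int => List.replicate r.2.toNat r.1) (pvRuns split) []]
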